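-- pv_equiv track=rewrite | github.com/ywcheong/solved-baekjoon | solve/5710.py | solve
-- ===== SOURCE A (Python) =====
-- def energy_to_price(energy):
--     if energy < 100:
--         return 2 * energy
--     elif energy < 10000:
--         return 3 * (energy - 100) + 200
--     elif energy < 1_000_100:
--         return 5 * (energy - 10000) + 29900
--     else:
--         return 7 * (energy - 1_000_000) + 4_979_900
--
-- def price_to_energy(price):
--     if price < 200:
--         return price // 2
--     elif price < 29900:
--         return (price - 200) // 3 + 100
--     elif price < 4_979_900:
--         return (price - 29900) // 5 + 10000
--     else:
--         return (price - 4_979_900) // 7 + 1_000_000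
--
-- def solve(priceof_energy_sum, price_diff):
--     """write your logic here"""
--     energy_sum = price_to_energy(priceof_energy_sum)
--
--     def cond(e):
--         return energy_to_price(energy_sum - e) - energy_to_price(e) <= price_diff
--
--     lo, hi = 0, energy_sum // 2
--
--     if cond(lo):
--         return energy_to_price(lo)
--
--     while lo + 1 < hi:
--         mid = (lo + hi) // 2
--         if cond(mid):   # X O O
--             hi = mid
--         else:           # X X O
--             lo = mid
--
--     return energy_to_price(hi)
-- ===== SOURCE B (Python) =====
-- def energy_to_price(energy):
--     if energy < 100:
--         return 2 * energy
--     elif energy < 10000: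
--         return 3 * (energy - 100) + 200
--     elif energy < 1_000_100:
--         return 5 * (energy - 10000) + 29900
--     else:
--         return 7 * (energy - 1_000_000) + 4_979_900
--
-- def price_to_energy(price):
--     if price < 200:
--         return price // 2
--     elif price < 29900:
--         return (price - 200) // 3 + 100
--     elif price < 4_979_900:
--         return (price - 29900) // 5 + 10000
--     else:
--         return (price - 4_979_900) // 7 + 1_000_000
--
-- def solve(priceof_energy_sum, price_diff):
--     # Forward jump-scan for the smallest energy split e whose price gap is
--     # within price_diff: the gap function drops by at most 410 per unit of e
--     # (each price step is between 2 and 205), so from a gap g every position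
--     # closer than g // 410 still fails and can be skipped in one jump.
--     energy_sum = price_to_energy(priceof_energy_sum)
--     half = energy_sum // 2
--     e = 0
--     while e <= half:
--         gap = energy_to_price(energy_sum - e) - energy_to_price(e) - price_diff
--         if gap <= 0:
--             return energy_to_price(e)
--         e += max(1, gap // 410)
--     return energy_to_price(half)
-- ===== Notes on version B (the rewrite author's own statement) =====
-- stated objective: alternative
-- what changed: Replaces the lo/hi bisection (with its pre-loop cond(0) check) by a single forward jump-scan that finds the smallest in-budget split directly, advancing by gap // 410 using the bound that the price gap drops by at least 4 and at most 410 per energy step.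
-- outside the precondition, e.g. on solve(-4, 0): A returns 0, B returns -2
import Mathlib
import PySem

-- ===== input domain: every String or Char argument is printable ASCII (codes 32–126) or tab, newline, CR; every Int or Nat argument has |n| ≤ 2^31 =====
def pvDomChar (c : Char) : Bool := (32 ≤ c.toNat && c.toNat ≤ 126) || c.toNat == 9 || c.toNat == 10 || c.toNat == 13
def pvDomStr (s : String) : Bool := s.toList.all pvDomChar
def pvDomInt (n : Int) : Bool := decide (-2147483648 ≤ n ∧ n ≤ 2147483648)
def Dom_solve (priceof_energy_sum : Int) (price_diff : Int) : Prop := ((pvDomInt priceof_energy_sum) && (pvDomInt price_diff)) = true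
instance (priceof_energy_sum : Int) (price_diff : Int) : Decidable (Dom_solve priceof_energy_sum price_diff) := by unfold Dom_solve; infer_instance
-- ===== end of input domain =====

-- B replaces A's lo/hi bisection by a forward jump-scan for the same smallest
-- in-budget split, advancing by gap // 410 using the bound that the price gap
-- drops by at most 410 per energy step (objective: alternative algorithm).

-- ===== PORT A =====
def energy_to_price (energy : Int) : Int :=
  if energy < 100 then 2 * energy
  else if energy < 10000 then 3 * (energy - 100) + 200
  else if energy < 1000100 then 5 * (energy - 10000) + 29900
  else 7 * (energy - 1000000) + 4979900

def price_to_energy (price : Int) : Int :=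
  if price < 200 then PySem.Int.floordiv price 2
  else if price < 29900 then PySem.Int.floordiv (price - 200) 3 + 100
  else if price < 4979900 then PySem.Int.floordiv (price - 29900) 5 + 10000
  else PySem.Int.floordiv (price - 4979900) 7 + 1000000

-- A's closure `cond(e)` over energy_sum and price_diff
def condA (energy_sum : Int) (price_diff : Int) (e : Int) : Bool :=
  energy_to_price (energy_sum - e) - energy_to_price e ≤ price_diff

-- A's `while lo + 1 < hi` binary-search loop
def bsLoop (energy_sum price_diff lo hi : Int) : Int :=
  if _h : lo + 1 < hi then
    let mid := PySem.Int.floordiv (lo + hi) 2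
    if condA energy_sum price_diff mid then bsLoop energy_sum price_diff lo mid
    else bsLoop energy_sum price_diff mid hi
  else energy_to_price hi
termination_by (hi - lo).toNat
decreasing_by
  all_goals
    have h2 := PySem.Int.floordiv_mul_add_mod (lo + hi) 2
    have h3 := PySem.Int.mod_nonneg (lo + hi) (b := 2) (by omega)
    have h4 := PySem.Int.mod_lt (lo + hi) (b := 2) (by omega)
    omega

def solve (priceof_energy_sum : Int) (price_diff : Int) : Int :=
  let energy_sum := price_to_energy priceof_energy_sum
  let lo : Int := 0
  let hi : Int := PySem.Int.floordiv energy_sum 2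
  if condA energy_sum price_diff lo then energy_to_price lo
  else bsLoop energy_sum price_diff lo hi

-- ===== PORT B =====
-- B's `while e <= half` forward jump loop
def jumpLoop (energy_sum price_diff half e : Int) : Int :=
  if _h : e ≤ half then
    let gap := energy_to_price (energy_sum - e) - energy_to_price e - price_diff
    if gap ≤ 0 then energy_to_price e
    else jumpLoop energy_sum price_diff half (e + max 1 (PySem.Int.floordiv gap 410))
  else energy_to_price half
termination_by (half + 1 - e).toNat
decreasing_by
  have : (1 : Int) ≤ max 1 (PySem.Int.floordiv (energy_to_price (energy_sum - e) - energy_to_price e - price_diff) 410) := le_max_left _ _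
  omega

def solve_alt (priceof_energy_sum : Int) (price_diff : Int) : Int :=
  let energy_sum := price_to_energy priceof_energy_sum
  let half := PySem.Int.floordiv energy_sum 2
  jumpLoop energy_sum price_diff half 0

-- ===== PRECONDITION & SPEC =====
-- Pre_ restricts to the problem's natural domain of nonnegative total prices; for
-- negative prices (where the scan range [0, energy_sum//2] is empty) A's pre-loop
-- cond(0) check can still return the one-sided split price 0, an accident B does
-- not mirror.
def Pre_solve (priceof_energy_sum : Int) (_price_diff : Int) : Prop := 0 ≤ priceof_energy_sum
instance (priceof_energy_sum : Int) (price_diff : Int) : Decidable (Pre_solve priceof_energy_sum price_diff) := by unfold Pre_solve; infer_instance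
def pvWitness_solve : Int × Int := (1000, 3)

def Spec_solve (priceof_energy_sum : Int) (price_diff : Int) (out : Int) : Prop := out = solve_alt priceof_energy_sum price_diff
instance (priceof_energy_sum : Int) (price_diff : Int) (out : Int) : Decidable (Spec_solve priceof_energy_sum price_diff out) := by unfold Spec_solve; infer_instance

-- ===== CLAIM (what is proved, stated in full; the proofs are below) =====
def Claim_equal_solve : Prop := ∀ (priceof_energy_sum : Int) (price_diff : Int), Dom_solve priceof_energy_sum price_diff → Pre_solve priceof_energy_sum price_diff → Spec_solve priceof_energy_sum price_diff (solve priceof_energy_sum price_diff)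

-- ===== LEMMAS AND PROOFS =====

-- reference linear scan: first e in [e, half] with condA, else half (proof-only)
def scanLoop (energy_sum price_diff half e : Int) : Int :=
  if _h : e ≤ half then
    if condA energy_sum price_diff e then energy_to_price e
    else scanLoop energy_sum price_diff half (e + 1)
  else energy_to_price half
termination_by (half + 1 - e).toNat

-- one price step is between 2 and 205
theorem etp_step (a : Int) : 2 ≤ energy_to_price (a + 1) - energy_to_price a ∧
    energy_to_price (a + 1) - energy_to_price a ≤ 205 := by
  unfold energy_to_price; split_ifs <;> omega

theorem etp_mono {a b : Int} (h : a ≤ b) : energy_to_price a ≤ energy_to_price b := by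
  unfold energy_to_price; split_ifs <;> omega

-- the gap function f e = p(S-e) - p(e) is antitone
theorem gap_antitone (S : Int) {a b : Int} (h : a ≤ b) :
    energy_to_price (S - b) - energy_to_price b ≤ energy_to_price (S - a) - energy_to_price a := by
  have h1 := etp_mono (a := S - b) (b := S - a) (by omega)
  have h2 := etp_mono h
  omega

-- the gap drops by at most 410 per step, hence ≤ 410*j over j steps
theorem gap_lipschitz (S e : Int) : ∀ j : Nat,
    (energy_to_price (S - e) - energy_to_price e) -
      (energy_to_price (S - (e + j)) - energy_to_price (e + j)) ≤ 410 * j := by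
  intro j
  induction j with
  | zero => simp
  | succ k ih =>
    have h1 := etp_step (e + (k : Int))
    have h2 := etp_step (S - (e + (k : Int)) - 1)
    have hx : S - (e + (k : Int)) - 1 + 1 = S - (e + (k : Int)) := by ring
    rw [hx] at h2
    push_cast
    have g2 : S - (e + ((k : Int) + 1)) = S - (e + (k : Int)) - 1 := by ring
    have g1 : e + ((k : Int) + 1) = e + (k : Int) + 1 := by ring
    rw [g2, g1]
    omega

-- skipping positions that all fail condA leaves scanLoop unchanged
theorem scan_skip (S d half : Int) : ∀ (k : Nat) (e : Int),
    (∀ j : Nat, j < k → ¬ condA S d (e + j) = true) →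
    scanLoop S d half e = scanLoop S d half (e + k) := by
  intro k
  induction k with
  | zero => intro e _; simp
  | succ m ih =>
    intro e hfail
    by_cases he : e ≤ half
    · rw [scanLoop, dif_pos he]
      have h0 : ¬ condA S d e = true := by
        have := hfail 0 (by omega); simpa using this
      rw [if_neg h0]
      have := ih (e + 1) (by
        intro j hj
        have := hfail (j + 1) (by omega)
        have harg : (e + 1) + (j : Int) = e + ((j + 1 : Nat) : Int) := by push_cast; ring
        rw [harg]; exact this)
      rw [this]
      congr 1
      push_cast; ring
    · rw [scanLoop, dif_neg he, scanLoop, dif_neg (by push_cast; omega)]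

-- B's jump loop computes the linear scan
theorem jump_eq_scan (S d half : Int) : ∀ e : Int,
    jumpLoop S d half e = scanLoop S d half e := by
  have main : ∀ (n : Nat) (e : Int), (half + 1 - e).toNat ≤ n →
      jumpLoop S d half e = scanLoop S d half e := by
    intro n
    induction n with
    | zero =>
      intro e hn
      have he : ¬ e ≤ half := by omega
      rw [jumpLoop, dif_neg he, scanLoop, dif_neg he]
    | succ m ih =>
      intro e hn
      by_cases he : e ≤ half
      · rw [jumpLoop, dif_pos he]
        by_cases hg : energy_to_price (S - e) - energy_to_price e - d ≤ 0
        · rw [if_pos hg, scanLoop, dif_pos he,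
            if_pos (by simp [condA]; omega)]
        · rw [if_neg hg]
          set gap := energy_to_price (S - e) - energy_to_price e - d with hgap
          set k : Int := max 1 (PySem.Int.floordiv gap 410) with hk
          have hfd := PySem.Int.floordiv_mul_add_mod gap 410
          have hm0 := PySem.Int.mod_nonneg gap (b := 410) (by omega)
          have hm1 := PySem.Int.mod_lt gap (b := 410) (by omega)
          have hk1 : 1 ≤ k := le_max_left _ _
          have hk410 : 410 * (k - 1) < gap := by
            rcases max_cases 1 (PySem.Int.floordiv gap 410) with ⟨h1, h2⟩ | ⟨h1, h2⟩ <;>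
              [skip; skip] <;> rw [hk, h1] <;> omega
          have hrec := ih (e + k) (by omega)
          rw [hrec]
          have hkn : k = ((k.toNat : Nat) : Int) := by omega
          rw [hkn]
          refine (scan_skip S d half k.toNat e ?_).symm
          intro j hj
          have hjk : (j : Int) ≤ k - 1 := by omega
          have hmono := gap_antitone S (a := e) (b := e + j) (by omega)
          have hlip := gap_lipschitz S e j
          have hjb : 410 * (j : Int) ≤ 410 * (k - 1) := by omega
          simp only [condA, decide_eq_true_eq]
          omega
      · rw [jumpLoop, dif_neg he, scanLoop, dif_neg he]
  intro e; exact main (half + 1 - e).toNat e le_rfl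

-- A's binary search, under its loop invariant, computes the linear scan from lo+1
theorem bs_eq_scan (S d half : Int) : ∀ (n : Nat) (lo hi : Int), (hi - lo).toNat ≤ n →
    lo < hi → hi ≤ half → ¬ condA S d lo = true →
    (condA S d hi = true ∨ hi = half) →
    bsLoop S d lo hi = scanLoop S d half (lo + 1) := by
  intro n
  induction n with
  | zero => intro lo hi hn hlt; omega
  | succ m ih =>
    intro lo hi hn hlt hhi hlo hdisj
    by_cases hstep : lo + 1 < hi
    · rw [bsLoop, dif_pos hstep]
      have hfd := PySem.Int.floordiv_mul_add_mod (lo + hi) 2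
      have hm0 := PySem.Int.mod_nonneg (lo + hi) (b := 2) (by omega)
      have hm1 := PySem.Int.mod_lt (lo + hi) (b := 2) (by omega)
      set mid := PySem.Int.floordiv (lo + hi) 2 with hmid
      have hlomid : lo < mid := by omega
      have hmidhi : mid < hi := by omega
      by_cases hc : condA S d mid = true
      · rw [if_pos hc]
        exact ih lo mid (by omega) hlomid (by omega) hlo (Or.inl hc)
      · rw [if_neg hc]
        have h2 := ih mid hi (by omega) hmidhi hhi hc hdisj
        rw [h2]
        have hskip := scan_skip S d half (mid - lo).toNat (lo + 1) (by
          intro j hj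
          have hle : lo + 1 + (j : Int) ≤ mid := by omega
          have hmono := gap_antitone S (a := lo + 1 + j) (b := mid) hle
          simp only [condA, decide_eq_true_eq] at hc ⊢
          omega)
        have harg : lo + 1 + (((mid - lo).toNat : Nat) : Int) = mid + 1 := by omega
        rw [harg] at hskip
        exact hskip.symm
    · -- hi = lo + 1
      have hhieq : hi = lo + 1 := by omega
      rw [bsLoop, dif_neg hstep, ← hhieq]
      rcases hdisj with hc | hhalf
      · rw [scanLoop, dif_pos (by omega), if_pos hc]
      · subst hhalf
        by_cases hc : condA S d hi = true
        · rw [scanLoop, dif_pos le_rfl, if_pos hc]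
        · rw [scanLoop, dif_pos le_rfl, if_neg hc, scanLoop, dif_neg (by omega)]

theorem pte_nonneg {p : Int} (hp : 0 ≤ p) : 0 ≤ price_to_energy p := by
  unfold price_to_energy
  split_ifs with h1 h2 h3
  · have := (PySem.Int.le_floordiv_iff_mul_le (a := p) (b := 2) (q := 0) (by omega)).mpr (by omega)
    omega
  · have := (PySem.Int.le_floordiv_iff_mul_le (a := p - 200) (b := 3) (q := 0) (by omega)).mpr (by omega)
    omega
  · have := (PySem.Int.le_floordiv_iff_mul_le (a := p - 29900) (b := 5) (q := 0) (by omega)).mpr (by omega)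
    omega
  · have := (PySem.Int.le_floordiv_iff_mul_le (a := p - 4979900) (b := 7) (q := 0) (by omega)).mpr (by omega)
    omega

-- ===== VERDICT (by name: the statement is the Claim_ definition above) =====
theorem solve_spec : Claim_equal_solve := by
  intro P d _hdom hpre
  unfold Spec_solve
  simp only [solve, solve_alt]
  set S := price_to_energy P with hS
  have hS0 : 0 ≤ S := pte_nonneg hpre
  set half := PySem.Int.floordiv S 2 with hhalf
  have hh0 : 0 ≤ half := by
    have := (PySem.Int.le_floordiv_iff_mul_le (a := S) (b := 2) (q := 0) (by omega)).mpr (by omega)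
    omega
  rw [jump_eq_scan]
  by_cases hc0 : condA S d 0 = true
  · rw [if_pos hc0, scanLoop, dif_pos hh0, if_pos hc0]
  · rw [if_neg hc0]
    by_cases hpos : 0 < half
    · rw [bs_eq_scan S d half (half - 0).toNat 0 half le_rfl hpos le_rfl hc0 (Or.inr rfl)]
      have hstep : scanLoop S d half 0 = scanLoop S d half (0 + 1) := by
        rw [scanLoop, dif_pos hh0, if_neg hc0]
      exact hstep.symm
    · have h0 : half = 0 := by omega
      rw [h0, bsLoop, dif_neg (by omega), scanLoop, dif_pos le_rfl, if_neg hc0,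
        scanLoop, dif_neg (by omega)]
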